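-- pv_equiv track=rewrite | github.com/iloi05/CPSC335-P4 | algo1.py | exhaust_stock
-- ===== SOURCE A (Python) =====
-- def exhaust_stock(stocks, budget):
--     bestStock = 0
--     bestSet = []
--
--     s = len(stocks)
--
--     for m in range(1 << s):
--         currSet = []
--         currVal = 0
--
--         for i in range(s):
--             if m & (1 << i):
--                 currSet.append(i + 1)
--                 currVal += stocks[i][1]
--         if currVal <= budget and currVal > bestStock:
--             bestStock = currVal
--             bestSet = currSet
--     return bestStock, bestSet
-- ===== SOURCE B (Python) =====
-- def exhaust_stock(stocks, budget):
--     # Build the list of all (value, chosen-indices) subset pairs incrementally,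
--     # in exactly mask order, then take the best affordable one in one pass.
--     subsets = [(0, [])]
--     for i in range(len(stocks)):
--         v = stocks[i][1]
--         subsets = subsets + [(val + v, chosen + [i + 1]) for (val, chosen) in subsets]
--     bestStock, bestSet = 0, []
--     for val, chosen in subsets:
--         if val <= budget and val > bestStock:
--             bestStock, bestSet = val, chosen
--     return bestStock, bestSet
-- ===== Notes on version B (the rewrite author's own statement) =====
-- stated objective: alternative
-- what changed: Replaces the nested mask/bit-test loops (for each of the 2^n masks, scan all n bits) by incrementally doubling a list of (value, chosen-indices) pairs, one pass per stock, which produces all subsets in exactly mask order, then a single scan picks the best affordable one.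
import Mathlib
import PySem

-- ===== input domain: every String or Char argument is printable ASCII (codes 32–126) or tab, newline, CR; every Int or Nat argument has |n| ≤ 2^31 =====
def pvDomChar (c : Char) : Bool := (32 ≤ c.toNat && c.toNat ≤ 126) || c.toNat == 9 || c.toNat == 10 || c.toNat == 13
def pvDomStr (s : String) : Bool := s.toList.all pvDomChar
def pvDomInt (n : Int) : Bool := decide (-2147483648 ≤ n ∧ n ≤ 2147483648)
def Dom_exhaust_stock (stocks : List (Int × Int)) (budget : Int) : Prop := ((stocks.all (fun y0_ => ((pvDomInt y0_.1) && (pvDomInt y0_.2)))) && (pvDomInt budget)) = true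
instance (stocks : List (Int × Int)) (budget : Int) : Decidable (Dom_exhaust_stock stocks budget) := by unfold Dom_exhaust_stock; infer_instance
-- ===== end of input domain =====

-- ===== PORT A =====
-- B builds the powerset incrementally (value, chosen indices) in mask order instead of A's
-- nested mask/bit loops; objective: alternative decomposition, same exponential cost.
-- Python's `range` over nonnegative ints and `m & (1 << i)` are ported on Nat (exact for
-- nonnegative Python ints); `stocks[i]` with 0 ≤ i < len(stocks) is the in-range index getD.
def pvInnerA (stocks : List (Int × Int)) (s : Nat) (m : Nat) : List Int × Int :=
  (List.range s).foldl (fun st i =>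
      if m &&& (1 <<< i) ≠ 0 then (st.1 ++ [(i : Int) + 1], st.2 + (stocks.getD i (0, 0)).2)
      else st) ([], 0)

def exhaust_stock (stocks : List (Int × Int)) (budget : Int) : Int × List Int :=
  (List.range (1 <<< stocks.length)).foldl (fun best m =>
      let c := pvInnerA stocks stocks.length m
      if c.2 ≤ budget ∧ c.2 > best.1 then (c.2, c.1) else best) (0, [])

-- ===== PORT B =====
-- subsets after processing the first k stocks: all (value, chosen 1-based indices) pairs
def pvSubsetsB (stocks : List (Int × Int)) (k : Nat) : List (Int × List Int) :=
  (List.range k).foldl (fun acc i =>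
      acc ++ acc.map (fun vc => (vc.1 + (stocks.getD i (0, 0)).2, vc.2 ++ [(i : Int) + 1])))
    [(0, [])]

def exhaust_stock_alt (stocks : List (Int × Int)) (budget : Int) : Int × List Int :=
  (pvSubsetsB stocks stocks.length).foldl (fun best vc =>
      if vc.1 ≤ budget ∧ vc.1 > best.1 then vc else best) (0, [])

-- ===== PRECONDITION & SPEC =====
def Spec_exhaust_stock (stocks : List (Int × Int)) (budget : Int) (out : Int × List Int) : Prop := out = exhaust_stock_alt stocks budget
instance (stocks : List (Int × Int)) (budget : Int) (out : Int × List Int) : Decidable (Spec_exhaust_stock stocks budget out) := by unfold Spec_exhaust_stock; infer_instance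

-- ===== CLAIM (what is proved, stated in full; the proofs are below) =====
def Claim_equal_exhaust_stock : Prop := ∀ (stocks : List (Int × Int)) (budget : Int), Dom_exhaust_stock stocks budget → Spec_exhaust_stock stocks budget (exhaust_stock stocks budget)

-- ===== LEMMAS AND PROOFS =====

theorem pvBit_iff (x i : Nat) : (x &&& (1 <<< i) ≠ 0) = (x.testBit i = true) := by
  simp [Nat.shiftLeft_eq, Nat.and_two_pow]

-- low bits are insensitive to adding 2^k
theorem pvInnerA_add_pow (stocks : List (Int × Int)) (k : Nat) (m : Nat) :
    pvInnerA stocks k (2 ^ k + m) = pvInnerA stocks k m := by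
  unfold pvInnerA
  apply PySem.List.foldl_congr_mem
  intro acc i hi
  have hik : i < k := List.mem_range.mp hi
  have : (2 ^ k + m).testBit i = m.testBit i := Nat.testBit_two_pow_add_gt hik m
  simp [pvBit_iff, this]

theorem pvInnerA_succ (stocks : List (Int × Int)) (k : Nat) (m : Nat) :
    pvInnerA stocks (k + 1) m =
      (if m &&& (1 <<< k) ≠ 0 then
        ((pvInnerA stocks k m).1 ++ [(k : Int) + 1],
         (pvInnerA stocks k m).2 + (stocks.getD k (0, 0)).2)
      else pvInnerA stocks k m) := by
  unfold pvInnerA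
  rw [List.range_succ, List.foldl_append]
  simp

-- the list of (value, set) pairs A scans, in mask order, equals B's incremental powerset
theorem pvMap_range_eq (stocks : List (Int × Int)) (k : Nat) :
    (List.range (2 ^ k)).map
        (fun m => ((pvInnerA stocks k m).2, (pvInnerA stocks k m).1))
      = pvSubsetsB stocks k := by
  induction k with
  | zero =>
      simp [pvSubsetsB, pvInnerA]
  | succ k ih =>
      have hsplit : List.range (2 ^ (k + 1)) =
          List.range (2 ^ k) ++ (List.range (2 ^ k)).map (2 ^ k + ·) := by
        rw [pow_succ, mul_two, List.range_add]
      have hlow : ∀ m ∈ List.range (2 ^ k),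
          pvInnerA stocks (k + 1) m = pvInnerA stocks k m := by
        intro m hm
        have hmlt : m < 2 ^ k := List.mem_range.mp hm
        rw [pvInnerA_succ]
        have : (m &&& (1 <<< k) ≠ 0) = False := by
          simp [pvBit_iff, Nat.testBit_lt_two_pow hmlt]
        simp [this]
      have hhigh : ∀ m ∈ List.range (2 ^ k),
          pvInnerA stocks (k + 1) (2 ^ k + m) =
            ((pvInnerA stocks k m).1 ++ [(k : Int) + 1],
             (pvInnerA stocks k m).2 + (stocks.getD k (0, 0)).2) := by
        intro m hm
        have hmlt : m < 2 ^ k := List.mem_range.mp hm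
        rw [pvInnerA_succ]
        have hb : (2 ^ k + m).testBit k = true := by
          simp [Nat.testBit_two_pow_add_eq, Nat.testBit_lt_two_pow hmlt]
        rw [pvInnerA_add_pow]
        simp [pvBit_iff, hb]
      rw [hsplit, List.map_append, List.map_map]
      have h1 : (List.range (2 ^ k)).map
            (fun m => ((pvInnerA stocks (k + 1) m).2, (pvInnerA stocks (k + 1) m).1))
          = pvSubsetsB stocks k := by
        rw [← ih]
        apply List.map_congr_left
        intro m hm
        rw [hlow m hm]
      have h2 : (List.range (2 ^ k)).map
            ((fun m => ((pvInnerA stocks (k + 1) m).2, (pvInnerA stocks (k + 1) m).1)) ∘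
              (2 ^ k + ·))
          = (pvSubsetsB stocks k).map
              (fun vc => (vc.1 + (stocks.getD k (0, 0)).2, vc.2 ++ [(k : Int) + 1])) := by
        rw [← ih, List.map_map]
        apply List.map_congr_left
        intro m hm
        simp only [Function.comp]
        rw [hhigh m hm]
      rw [h1, h2]
      unfold pvSubsetsB
      rw [List.range_succ, List.foldl_append]
      simp

-- ===== VERDICT (by name: the statement is the Claim_ definition above) =====
theorem exhaust_stock_spec : Claim_equal_exhaust_stock := by
  intro stocks budget _
  unfold Spec_exhaust_stock exhaust_stock exhaust_stock_alt
  rw [← pvMap_range_eq stocks stocks.length, List.foldl_map, Nat.one_shiftLeft]
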